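-- pv_equiv track=rewrite | github.com/lucaslarcher/Framework_Analise_Saida_NS2 | NS-2_Script_Changer.py | getPoloAndNumber
-- ===== SOURCE A (Python) =====
-- numMachines4Polo = [30,20,47,50,30]
--
-- def getPoloAndNumber(index):#with a order index, return polo and machine number
--     poloAndMachine = []
--     sumPolo = 0
--     indexPolo = 0
--     for machines4Polo in numMachines4Polo:
--         sumPolo += machines4Polo
--         if(sumPolo > index):
--             poloAndMachine.append(indexPolo+1)
--             poloAndMachine.append(index - (sumPolo - machines4Polo)+1)
--             return poloAndMachine
--         indexPolo += 1
-- ===== SOURCE B (Python) =====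
-- _PREFIX = [30, 50, 97, 147, 177]  # cumulative machine counts per polo
--
-- def getPoloAndNumber(index):
--     # binary search for first prefix entry strictly greater than index
--     lo, hi = 0, len(_PREFIX)
--     while lo < hi:
--         mid = (lo + hi) // 2
--         if _PREFIX[mid] <= index:
--             lo = mid + 1
--         else:
--             hi = mid
--     if lo == len(_PREFIX):
--         return None
--     return [lo + 1, index + 1 - (_PREFIX[lo - 1] if lo > 0 else 0)]
-- ===== Notes on version B (the rewrite author's own statement) =====
-- stated objective: alternative
-- what changed: Replaces the linear scan with running sums by a binary search (bisect_right style) over a precomputed prefix-sum table of cumulative machine counts.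
import Mathlib
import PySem

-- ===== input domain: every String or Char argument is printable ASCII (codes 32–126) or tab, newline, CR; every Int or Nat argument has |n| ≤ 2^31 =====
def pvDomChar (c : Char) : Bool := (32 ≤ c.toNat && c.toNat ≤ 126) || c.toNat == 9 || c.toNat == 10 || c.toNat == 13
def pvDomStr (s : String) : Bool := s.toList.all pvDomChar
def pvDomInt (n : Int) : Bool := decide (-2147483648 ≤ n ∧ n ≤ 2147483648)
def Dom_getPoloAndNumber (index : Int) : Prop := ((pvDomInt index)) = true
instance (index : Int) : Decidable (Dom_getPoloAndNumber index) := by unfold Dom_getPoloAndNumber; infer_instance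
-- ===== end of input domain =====

-- B replaces A's linear scan with running sums by a binary search over a precomputed prefix-sum table (alternative algorithm).

-- ===== PORT A =====
def numMachines4Polo : List Int := [30, 20, 47, 50, 30]

-- the for-loop of A, with early return, as structural recursion over the list
def goA (index : Int) : List Int → Int → Int → Option (List Int)
  | [], _, _ => none
  | m :: rest, sumPolo, indexPolo =>
    let s := sumPolo + m
    if s > index then some [indexPolo + 1, index - (s - m) + 1]
    else goA index rest s (indexPolo + 1)

def getPoloAndNumber (index : Int) : Option (List Int) :=
  goA index numMachines4Polo 0 0

-- ===== PORT B =====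
def pvPrefix : List Int := [30, 50, 97, 147, 177]

-- Source B's hand-written binary search (bisect_right style), recursion on hi - lo
def bsR (index : Int) (lo hi : Nat) : Nat :=
  if h : lo < hi then
    let mid := (lo + hi) / 2
    if pvPrefix.getD mid 0 ≤ index then bsR index (mid + 1) hi
    else bsR index lo mid
  else lo
termination_by hi - lo
decreasing_by all_goals omega

def getPoloAndNumber_alt (index : Int) : Option (List Int) :=
  let lo := bsR index 0 pvPrefix.length
  if lo = pvPrefix.length then none
  else some [(lo : Int) + 1, index + 1 - (if lo > 0 then pvPrefix.getD (lo - 1) 0 else 0)]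

-- ===== PRECONDITION & SPEC =====
def Spec_getPoloAndNumber (index : Int) (out : Option (List Int)) : Prop := out = getPoloAndNumber_alt index
instance (index : Int) (out : Option (List Int)) : Decidable (Spec_getPoloAndNumber index out) := by unfold Spec_getPoloAndNumber; infer_instance

-- ===== CLAIM (what is proved, stated in full; the proofs are below) =====
def Claim_equal_getPoloAndNumber : Prop := ∀ (index : Int), Dom_getPoloAndNumber index → Spec_getPoloAndNumber index (getPoloAndNumber index)

-- ===== LEMMAS AND PROOFS =====
theorem bsR_eval (index : Int) : bsR index 0 5 =
    (if index < 30 then 0 else if index < 50 then 1 else if index < 97 then 2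
     else if index < 147 then 3 else if index < 177 then 4 else 5) := by
  rw [bsR.eq_def]
  norm_num [pvPrefix]
  split_ifs with h1 <;>
  · rw [bsR.eq_def]; norm_num [pvPrefix]
    split_ifs <;>
    · rw [bsR.eq_def]; norm_num [pvPrefix]
      try (split_ifs <;> (try rw [bsR.eq_def]) <;> norm_num <;> omega)
      try omega

-- ===== VERDICT (by name: the statement is the Claim_ definition above) =====
theorem getPoloAndNumber_spec : Claim_equal_getPoloAndNumber := by
  intro index _
  unfold Spec_getPoloAndNumber getPoloAndNumber getPoloAndNumber_alt
  have hlen : pvPrefix.length = 5 := by norm_num [pvPrefix]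
  rw [hlen, bsR_eval]
  simp only [goA, numMachines4Polo, pvPrefix]
  norm_num
  split_ifs <;> norm_num <;> omega
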